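-- pv_equiv track=rewrite | github.com/AshLLM/ai-gutenberg-processor | helper.py | _sanity_check_against_persons
-- ===== SOURCE A (Python) =====
-- from typing import Dict, List, Optional, Tuple
--
-- def _sanity_check_against_persons(
--     year: int,
--     persons: List[dict],
--     posthumous_window: int = 10,
-- ) -> bool:
--     """Return True if *year* is plausible given available birth/death years."""
--     for person in persons:
--         birth = person.get("birth_year")
--         death = person.get("death_year")
--         if birth is not None and year < birth:
--             return False
--         if death is not None and year > death + posthumous_window:
--             return False
--     return True
-- ===== SOURCE B (Python) =====
-- def _sanity_check_against_persons(year, persons, posthumous_window=10):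
--     """Return True if *year* is plausible given available birth/death years."""
--     earliest = max((p.get("birth_year") for p in persons
--                     if p.get("birth_year") is not None), default=None)
--     latest = min((p.get("death_year") + posthumous_window for p in persons
--                   if p.get("death_year") is not None), default=None)
--     return (earliest is None or year >= earliest) and \
--            (latest is None or year <= latest)
-- ===== Notes on version B (the rewrite author's own statement) =====
-- stated objective: alternative
-- what changed: Replaced the short-circuiting per-person guard loop by two aggregate passes: max of all birth years and min of all death_year+posthumous_window, followed by a single range comparison.
import Mathlib
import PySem

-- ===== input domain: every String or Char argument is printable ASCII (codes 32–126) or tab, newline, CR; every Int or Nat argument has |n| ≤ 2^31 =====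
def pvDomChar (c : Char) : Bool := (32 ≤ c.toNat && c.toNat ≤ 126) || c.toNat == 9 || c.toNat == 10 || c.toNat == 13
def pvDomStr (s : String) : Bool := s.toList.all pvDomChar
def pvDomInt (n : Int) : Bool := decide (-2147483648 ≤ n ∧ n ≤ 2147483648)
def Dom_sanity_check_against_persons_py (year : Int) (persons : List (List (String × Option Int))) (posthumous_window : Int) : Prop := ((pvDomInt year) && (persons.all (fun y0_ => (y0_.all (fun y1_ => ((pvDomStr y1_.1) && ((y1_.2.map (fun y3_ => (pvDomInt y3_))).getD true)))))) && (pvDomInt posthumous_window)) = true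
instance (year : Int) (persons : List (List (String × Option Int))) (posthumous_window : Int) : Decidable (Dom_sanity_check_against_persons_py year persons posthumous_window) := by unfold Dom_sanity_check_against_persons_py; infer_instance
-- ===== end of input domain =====

-- B replaces A's short-circuiting per-person guard loop by two aggregate passes
-- (max birth year, min death_year + window) and one final range comparison (objective: alternative).

-- ===== PORT A =====
-- early-return loop over persons, transliterated as structural recursion
def pvALoop (year posthumous_window : Int) : List (List (String × Option Int)) → Bool
  | [] => true
  | person :: rest =>
    let birth := (PySem.Dict.mk person).getD "birth_year" none
    let death := (PySem.Dict.mk person).getD "death_year" none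
    if (match birth with | some b => decide (year < b) | none => false) then false
    else if (match death with | some d => decide (year > d + posthumous_window) | none => false) then false
    else pvALoop year posthumous_window rest

def sanity_check_against_persons_py (year : Int) (persons : List (List (String × Option Int))) (posthumous_window : Int) : Bool :=
  pvALoop year posthumous_window persons

-- ===== PORT B =====
-- max(birth_year generator, default=None), running maximum over the filtered stream
def pvEarliest (persons : List (List (String × Option Int))) : Option Int :=
  persons.foldl (fun acc p =>
    match (PySem.Dict.mk p).getD "birth_year" none with
    | none => acc
    | some b => some (match acc with | none => b | some m => max m b)) none

-- min(death_year + posthumous_window generator, default=None), running minimum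
def pvLatest (posthumous_window : Int) (persons : List (List (String × Option Int))) : Option Int :=
  persons.foldl (fun acc p =>
    match (PySem.Dict.mk p).getD "death_year" none with
    | none => acc
    | some d => some (match acc with | none => d + posthumous_window | some m => min m (d + posthumous_window))) none

def sanity_check_against_persons_py_alt (year : Int) (persons : List (List (String × Option Int))) (posthumous_window : Int) : Bool :=
  (match pvEarliest persons with | none => true | some e => decide (e ≤ year)) &&
  (match pvLatest posthumous_window persons with | none => true | some l => decide (year ≤ l))

-- ===== PRECONDITION & SPEC =====
def Spec_sanity_check_against_persons_py (year : Int) (persons : List (List (String × Option Int))) (posthumous_window : Int) (out : Bool) : Prop := out = sanity_check_against_persons_py_alt year persons posthumous_window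
instance (year : Int) (persons : List (List (String × Option Int))) (posthumous_window : Int) (out : Bool) : Decidable (Spec_sanity_check_against_persons_py year persons posthumous_window out) := by unfold Spec_sanity_check_against_persons_py; infer_instance

-- ===== CLAIM (what is proved, stated in full; the proofs are below) =====
def Claim_equal_sanity_check_against_persons_py : Prop := ∀ (year : Int) (persons : List (List (String × Option Int))) (posthumous_window : Int), Dom_sanity_check_against_persons_py year persons posthumous_window → Spec_sanity_check_against_persons_py year persons posthumous_window (sanity_check_against_persons_py year persons posthumous_window)

-- ===== LEMMAS AND PROOFS =====

-- the final comparison of the running maximum equals the conjunction of per-person birth checks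
theorem pvEarliest_check (year : Int) (persons : List (List (String × Option Int))) (acc : Option Int) :
    (match persons.foldl (fun acc p =>
        match (PySem.Dict.mk p).getD "birth_year" none with
        | none => acc
        | some b => some (match acc with | none => b | some m => max m b)) acc with
      | none => true | some e => decide (e ≤ year)) =
    ((match acc with | none => true | some e => decide (e ≤ year)) &&
      persons.all (fun p => match (PySem.Dict.mk p).getD "birth_year" none with
        | none => true | some b => decide (b ≤ year))) := by
  induction persons generalizing acc with
  | nil => simp
  | cons p rest ih =>
    simp only [List.foldl_cons, List.all_cons, ih]
    cases h : (PySem.Dict.mk p).getD "birth_year" none with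
    | none => simp
    | some b =>
      cases acc with
      | none => simp
      | some m =>
        by_cases hm : m ≤ year <;> by_cases hb2 : b ≤ year <;>
          simp [hm, hb2]

theorem pvLatest_check (year posthumous_window : Int) (persons : List (List (String × Option Int))) (acc : Option Int) :
    (match persons.foldl (fun acc p =>
        match (PySem.Dict.mk p).getD "death_year" none with
        | none => acc
        | some d => some (match acc with | none => d + posthumous_window | some m => min m (d + posthumous_window))) acc with
      | none => true | some l => decide (year ≤ l)) =
    ((match acc with | none => true | some l => decide (year ≤ l)) &&
      persons.all (fun p => match (PySem.Dict.mk p).getD "death_year" none with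
        | none => true | some d => decide (year ≤ d + posthumous_window))) := by
  induction persons generalizing acc with
  | nil => simp
  | cons p rest ih =>
    simp only [List.foldl_cons, List.all_cons, ih]
    cases h : (PySem.Dict.mk p).getD "death_year" none with
    | none => simp
    | some d =>
      cases acc with
      | none => simp
      | some m =>
        by_cases hm : year ≤ m <;> by_cases hd2 : year ≤ d + posthumous_window <;>
          simp [hm, hd2]

-- A's early-return loop equals the conjunction of the two pointwise checks
theorem pvALoop_eq_all (year posthumous_window : Int) (persons : List (List (String × Option Int))) :
    pvALoop year posthumous_window persons =
      (persons.all (fun p => match (PySem.Dict.mk p).getD "birth_year" none with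
          | none => true | some b => decide (b ≤ year)) &&
       persons.all (fun p => match (PySem.Dict.mk p).getD "death_year" none with
          | none => true | some d => decide (year ≤ d + posthumous_window))) := by
  induction persons with
  | nil => rfl
  | cons p rest ih =>
    simp only [pvALoop, List.all_cons, ih]
    cases hb : (PySem.Dict.mk p).getD "birth_year" none with
    | none =>
      cases hd : (PySem.Dict.mk p).getD "death_year" none with
      | none => simp
      | some d =>
        by_cases h : year ≤ d + posthumous_window
        · simp [h, not_lt.mpr h]
        · simp [h, lt_of_not_ge h]
    | some b =>
      by_cases hby : year < b
      · simp [hby, not_le.mpr hby]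
      · cases hd : (PySem.Dict.mk p).getD "death_year" none with
        | none => simp [hby, not_lt.mp hby]
        | some d =>
          by_cases h : year ≤ d + posthumous_window
          · simp [hby, not_lt.mp hby, h, not_lt.mpr h]
          · simp [hby, h, lt_of_not_ge h]

-- ===== VERDICT (by name: the statement is the Claim_ definition above) =====
theorem sanity_check_against_persons_py_spec : Claim_equal_sanity_check_against_persons_py := by
  intro year persons posthumous_window _
  unfold Spec_sanity_check_against_persons_py sanity_check_against_persons_py
    sanity_check_against_persons_py_alt pvEarliest pvLatest
  rw [pvEarliest_check year persons none, pvLatest_check year posthumous_window persons none,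
    pvALoop_eq_all]
  simp
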